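-- pv_equiv track=rewrite | github.com/open-compass/VLMEvalKit | vlmeval/dataset/utils/mmhelix/evaluators/shingoki_eval.py | _validate_single_continuous_loop
-- ===== SOURCE A (Python) =====
-- from typing import Dict, Any, List, Set, Tuple, Union
--
-- def _validate_single_continuous_loop(segments: List[Tuple]) -> bool:
--     """
--     Validate that the segments form a single continuous loop
--
--     Args:
--         segments: List of line segments
--
--     Returns:
--         True if segments form a valid single continuous loop
--     """
--     if not segments:
--         return False
--
--     # Build adjacency graph
--     graph = {}
--     for p1, p2 in segments:
--         if p1 not in graph:
--             graph[p1] = []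
--         if p2 not in graph:
--             graph[p2] = []
--         graph[p1].append(p2)
--         graph[p2].append(p1)
--
--     # Rule: Each point must have exactly 2 connections (loop property)
--     for point, neighbors in graph.items():
--         if len(neighbors) != 2:
--             return False
--
--     # Rule: Must form exactly one connected component
--     if not graph:
--         return False
--
--     visited = set()
--     start_point = next(iter(graph.keys()))
--
--     def dfs(point):
--         visited.add(point)
--         for neighbor in graph[point]:
--             if neighbor not in visited:
--                 dfs(neighbor)
--
--     dfs(start_point)
--
--     # All points should be visited (single connected component)
--     return len(visited) == len(graph)
-- ===== SOURCE B (Python) =====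
-- def _validate_single_continuous_loop(segments):
--     if not segments:
--         return False
--
--     # Degree count per endpoint occurrence (a self-loop contributes 2 to one point).
--     deg = {}
--     for p1, p2 in segments:
--         deg[p1] = deg.get(p1, 0) + 1
--         deg[p2] = deg.get(p2, 0) + 1
--
--     if any(d != 2 for d in deg.values()):
--         return False
--
--     # Connectivity by saturation over the segment list (no adjacency lists, no recursion):
--     # grow the component of the first endpoint until a full pass adds nothing.
--     comp = {segments[0][0]}
--     changed = True
--     while changed:
--         changed = False
--         for p1, p2 in segments:
--             if p1 in comp and p2 not in comp:
--                 comp.add(p2)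
--                 changed = True
--             elif p2 in comp and p1 not in comp:
--                 comp.add(p1)
--                 changed = True
--
--     return len(comp) == len(deg)
-- ===== Notes on version B (the rewrite author's own statement) =====
-- stated objective: alternative
-- what changed: Replaced A's adjacency-list dict plus recursive DFS by a flat per-endpoint degree dict and an iterative fixed-point saturation over the segment list (no adjacency lists, no recursion); the component check grows a set by whole passes over the segments until stable.
import Mathlib
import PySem

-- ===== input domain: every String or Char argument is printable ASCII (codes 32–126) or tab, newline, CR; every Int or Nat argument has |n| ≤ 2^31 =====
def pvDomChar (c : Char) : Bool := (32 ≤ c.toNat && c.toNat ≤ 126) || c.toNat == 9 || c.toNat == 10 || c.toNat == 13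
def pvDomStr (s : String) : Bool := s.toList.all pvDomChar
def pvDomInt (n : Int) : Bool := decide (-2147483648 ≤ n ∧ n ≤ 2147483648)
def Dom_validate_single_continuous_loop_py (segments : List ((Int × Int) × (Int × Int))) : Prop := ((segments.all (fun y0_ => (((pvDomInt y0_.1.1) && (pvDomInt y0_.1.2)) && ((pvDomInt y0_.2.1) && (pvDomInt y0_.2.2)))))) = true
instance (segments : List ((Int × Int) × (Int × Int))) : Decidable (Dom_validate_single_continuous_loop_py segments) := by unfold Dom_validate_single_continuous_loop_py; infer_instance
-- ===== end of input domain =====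

-- B replaces A's adjacency-list dict + recursive DFS by a per-endpoint degree count and a
-- fixed-point saturation pass over the segment list (alternative decomposition, same cost class).


-- ===== PORT A =====
-- one iteration of A's graph-building loop body
def pvStepA (graph : PySem.Dict (Int × Int) (List (Int × Int))) (s : (Int × Int) × (Int × Int)) :
    PySem.Dict (Int × Int) (List (Int × Int)) :=
  let g1 := if graph.contains s.1 then graph else graph.insert s.1 []
  let g2 := if g1.contains s.2 then g1 else g1.insert s.2 []
  let g3 := g2.modify s.1 [] (· ++ [s.2])
  g3.modify s.2 [] (· ++ [s.1])

def pvBuildGraphA (segments : List ((Int × Int) × (Int × Int))) :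
    PySem.Dict (Int × Int) (List (Int × Int)) :=
  segments.foldl pvStepA PySem.Dict.empty

-- A's recursive dfs; the fuel argument only makes the recursion total (every recursive call
-- is guarded by 'neighbor not visited', so #vertices + 1 calls always suffice)
def pvDfsA (graph : PySem.Dict (Int × Int) (List (Int × Int))) :
    Nat → PySem.Set (Int × Int) → (Int × Int) → PySem.Set (Int × Int)
  | 0, visited, _ => visited
  | fuel + 1, visited, point =>
      (graph.getD point []).foldl
        (fun v n => if PySem.Set.contains v n then v else pvDfsA graph fuel v n)
        (PySem.Set.add visited point)

def validate_single_continuous_loop_py (segments : List ((Int × Int) × (Int × Int))) : Bool :=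
  if segments.isEmpty then false
  else
    let graph := pvBuildGraphA segments
    if graph.items.any (fun kv => decide (kv.2.length ≠ 2)) then false
    else if graph.size = 0 then false
    else
      match graph.keys with
      | [] => false
      | start :: _ =>
        let visited := pvDfsA graph (graph.size + 1) PySem.Set.empty start
        decide (visited.length = graph.size)

-- ===== PORT B =====
-- one iteration of B's degree-counting loop body
def pvStepB (d : PySem.Dict (Int × Int) Int) (s : (Int × Int) × (Int × Int)) :
    PySem.Dict (Int × Int) Int :=
  let d1 := d.insert s.1 (d.getD s.1 0 + 1)
  d1.insert s.2 (d1.getD s.2 0 + 1)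

def pvBuildDegB (segments : List ((Int × Int) × (Int × Int))) : PySem.Dict (Int × Int) Int :=
  segments.foldl pvStepB PySem.Dict.empty

-- one iteration of B's inner 'for p1, p2 in segments' saturation body
def pvStepP (st : PySem.Set (Int × Int) × Bool) (s : (Int × Int) × (Int × Int)) :
    PySem.Set (Int × Int) × Bool :=
  if PySem.Set.contains st.1 s.1 && !PySem.Set.contains st.1 s.2 then
    (PySem.Set.add st.1 s.2, true)
  else if PySem.Set.contains st.1 s.2 && !PySem.Set.contains st.1 s.1 then
    (PySem.Set.add st.1 s.1, true)
  else st

def pvPassB (segments : List ((Int × Int) × (Int × Int))) (comp : PySem.Set (Int × Int)) :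
    PySem.Set (Int × Int) × Bool :=
  segments.foldl pvStepP (comp, false)

-- B's 'while changed' loop; fuel only makes it total (a pass that changes adds a vertex)
def pvLoopB (segments : List ((Int × Int) × (Int × Int))) :
    Nat → PySem.Set (Int × Int) → PySem.Set (Int × Int)
  | 0, comp => comp
  | fuel + 1, comp =>
      let r := pvPassB segments comp
      if r.2 then pvLoopB segments fuel r.1 else r.1

def validate_single_continuous_loop_py_alt (segments : List ((Int × Int) × (Int × Int))) : Bool :=
  match segments with
  | [] => false
  | s0 :: _ =>
    let deg := pvBuildDegB segments
    if deg.values.any (fun d => decide (d ≠ 2)) then false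
    else
      let comp := pvLoopB segments (deg.size + 1) (PySem.Set.add PySem.Set.empty s0.1)
      decide (comp.length = deg.size)

-- ===== PRECONDITION & SPEC =====
def Spec_validate_single_continuous_loop_py (segments : List ((Int × Int) × (Int × Int))) (out : Bool) : Prop := out = validate_single_continuous_loop_py_alt segments
instance (segments : List ((Int × Int) × (Int × Int))) (out : Bool) : Decidable (Spec_validate_single_continuous_loop_py segments out) := by unfold Spec_validate_single_continuous_loop_py; infer_instance

-- ===== CLAIM (what is proved, stated in full; the proofs are below) =====
def Claim_equal_validate_single_continuous_loop_py : Prop := ∀ (segments : List ((Int × Int) × (Int × Int))), Dom_validate_single_continuous_loop_py segments → Spec_validate_single_continuous_loop_py segments (validate_single_continuous_loop_py segments)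

-- ===== LEMMAS AND PROOFS =====

-- the multiset of endpoints, in traversal order
def pvEndpoints (segs : List ((Int × Int) × (Int × Int))) : List (Int × Int) :=
  segs.flatMap (fun s => [s.1, s.2])

-- the common vertex list (first-occurrence order)
def pvK (segs : List ((Int × Int) × (Int × Int))) : PySem.Set (Int × Int) :=
  PySem.Set.ofList (pvEndpoints segs)

-- the edge relation of the segment list
def pvAdj (segs : List ((Int × Int) × (Int × Int))) (a b : Int × Int) : Prop :=
  ∃ s ∈ segs, (s.1 = a ∧ s.2 = b) ∨ (s.1 = b ∧ s.2 = a)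

-- A's adjacency list of a point, as a function of the segment list
def pvNbrs (segs : List ((Int × Int) × (Int × Int))) (p : Int × Int) : List (Int × Int) :=
  segs.flatMap (fun s => (if s.1 = p then [s.2] else []) ++ (if s.2 = p then [s.1] else []))

-- number of not-yet-visited vertices (termination measure of both searches)
def pvUnvis (segs : List ((Int × Int) × (Int × Int))) (v : PySem.Set (Int × Int)) : Nat :=
  List.countP (fun e => !PySem.Set.contains v e) (pvK segs)

-- ---- small set/list utilities ----

theorem pvContains_of_mem {s : PySem.Set (Int × Int)} {x : Int × Int} (h : x ∈ s) :
    PySem.Set.contains s x = true := (PySem.Set.contains_iff s x).mpr h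

theorem pvContains_of_not_mem {s : PySem.Set (Int × Int)} {x : Int × Int} (h : x ∉ s) :
    PySem.Set.contains s x = false := by
  cases hb : PySem.Set.contains s x
  · rfl
  · exact absurd ((PySem.Set.contains_iff s x).mp hb) h

theorem pvNot_mem_of_not_contains {s : PySem.Set (Int × Int)} {x : Int × Int}
    (h : ¬ PySem.Set.contains s x = true) : x ∉ s :=
  fun hm => h (pvContains_of_mem hm)

theorem pvAdd_of_mem (s : PySem.Set (Int × Int)) (x : Int × Int) (h : x ∈ s) :
    PySem.Set.add s x = s := by
  simp only [PySem.Set.add, pvContains_of_mem h, if_true]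

theorem pvAdd_of_not_mem (s : PySem.Set (Int × Int)) (x : Int × Int) (h : x ∉ s) :
    PySem.Set.add s x = s ++ [x] := by
  simp only [PySem.Set.add, pvContains_of_not_mem h, Bool.false_eq_true, if_false]

theorem pvSubset_add (s : PySem.Set (Int × Int)) (x : Int × Int) : s ⊆ PySem.Set.add s x :=
  fun _ hy => (PySem.Set.mem_add s x _).mpr (Or.inl hy)

theorem pvMem_add_self (s : PySem.Set (Int × Int)) (x : Int × Int) : x ∈ PySem.Set.add s x :=
  (PySem.Set.mem_add s x x).mpr (Or.inr rfl)

theorem pvAdd_subset {s t : PySem.Set (Int × Int)} {x : Int × Int}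
    (hx : x ∈ t) (hs : s ⊆ t) : PySem.Set.add s x ⊆ t := by
  intro y hy
  rcases (PySem.Set.mem_add s x y).mp hy with h | h
  · exact hs h
  · exact h ▸ hx

theorem pvCountP_lt {α : Type} (P Q : α → Bool) :
    ∀ l : List α, (∀ x ∈ l, P x = true → Q x = true) →
      ∀ a ∈ l, Q a = true → P a = false → l.countP P < l.countP Q := by
  intro l
  induction l with
  | nil => intro _ a ha _ _; exact absurd ha List.not_mem_nil
  | cons b l ih =>
    intro himp a ha hQ hP
    have hmono : l.countP P ≤ l.countP Q :=
      List.countP_mono_left (fun x hx => himp x (List.mem_cons_of_mem b hx))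
    rcases List.mem_cons.mp ha with rfl | ha'
    · simp only [List.countP_cons, hP, hQ, if_true, Bool.false_eq_true, if_false]
      omega
    · have hlt := ih (fun x hx => himp x (List.mem_cons_of_mem b hx)) a ha' hQ hP
      by_cases hb : P b = true
      · have hQb := himp b List.mem_cons_self hb
        simp only [List.countP_cons, hb, hQb, if_true]
        omega
      · have hb' : P b = false := by cases hbb : P b; rfl; exact absurd hbb hb
        simp only [List.countP_cons, hb', Bool.false_eq_true, if_false]
        by_cases hQb : Q b = true
        · simp only [hQb, if_true]; omega
        · have : Q b = false := by cases hbb : Q b; rfl; exact absurd hbb hQb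
          simp only [this, Bool.false_eq_true, if_false]; omega

theorem pvUnvis_mono (segs : List ((Int × Int) × (Int × Int)))
    {v w : PySem.Set (Int × Int)} (h : v ⊆ w) : pvUnvis segs w ≤ pvUnvis segs v := by
  apply List.countP_mono_left
  intro x _ hx
  cases hv : PySem.Set.contains v x
  · rfl
  · exfalso
    rw [pvContains_of_mem (h ((PySem.Set.contains_iff v x).mp hv))] at hx
    simp at hx

theorem pvUnvis_add_lt (segs : List ((Int × Int) × (Int × Int)))
    {v : PySem.Set (Int × Int)} {p : Int × Int} (hp : p ∈ pvK segs) (hv : p ∉ v) :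
    pvUnvis segs (PySem.Set.add v p) < pvUnvis segs v := by
  refine pvCountP_lt _ _ (pvK segs) ?_ p hp ?_ ?_
  · intro x _ hx
    cases hvx : PySem.Set.contains v x
    · rfl
    · exfalso
      rw [pvContains_of_mem (pvSubset_add v p ((PySem.Set.contains_iff v x).mp hvx))] at hx
      simp at hx
  · rw [pvContains_of_not_mem hv]; rfl
  · rw [pvContains_of_mem (pvMem_add_self v p)]; rfl

theorem pvUnvis_le_len (segs : List ((Int × Int) × (Int × Int))) (v : PySem.Set (Int × Int)) :
    pvUnvis segs v ≤ (pvK segs).length :=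
  List.countP_le_length

theorem pvUnvis_empty (segs : List ((Int × Int) × (Int × Int))) :
    pvUnvis segs [] = (pvK segs).length := by
  apply List.countP_eq_length.mpr
  intro x _
  rw [pvContains_of_not_mem List.not_mem_nil]; rfl

-- ---- structure of A's graph ----

theorem pvGetD_insert_nil (d : PySem.Dict (Int × Int) (List (Int × Int))) (k p : Int × Int) :
    ((if d.contains k then d else d.insert k []).getD p []) = d.getD p [] := by
  by_cases h : d.contains k = true
  · rw [if_pos h]
  · have h' : d.contains k = false := by cases hb : d.contains k; rfl; exact absurd hb h
    rw [if_neg h, PySem.Dict.getD_insert]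
    by_cases hp : p = k
    · subst hp
      rw [if_pos rfl, PySem.Dict.getD_of_not_contains d [] h']
    · rw [if_neg hp]

theorem pvEndpoints_cons (s : (Int × Int) × (Int × Int)) (l : List ((Int × Int) × (Int × Int))) :
    pvEndpoints (s :: l) = s.1 :: s.2 :: pvEndpoints l := by
  simp [pvEndpoints]

theorem pvNbrs_cons (s : (Int × Int) × (Int × Int)) (l : List ((Int × Int) × (Int × Int)))
    (p : Int × Int) :
    pvNbrs (s :: l) p =
      ((if s.1 = p then [s.2] else []) ++ (if s.2 = p then [s.1] else [])) ++ pvNbrs l p := by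
  simp [pvNbrs]

theorem pvStepA_getD (d : PySem.Dict (Int × Int) (List (Int × Int)))
    (s : (Int × Int) × (Int × Int)) (p : Int × Int) :
    (pvStepA d s).getD p [] =
      d.getD p [] ++ ((if s.1 = p then [s.2] else []) ++ (if s.2 = p then [s.1] else [])) := by
  rcases s with ⟨a, b⟩
  unfold pvStepA
  by_cases ha : a = p <;> by_cases hb : b = p
  · subst ha; subst hb
    simp [PySem.Dict.getD_modify, pvGetD_insert_nil]
  · subst ha
    have hb' : ¬ a = b := fun h => hb h.symm
    simp [PySem.Dict.getD_modify, pvGetD_insert_nil, hb, hb']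
  · subst hb
    have ha' : ¬ b = a := fun h => ha h.symm
    simp [PySem.Dict.getD_modify, pvGetD_insert_nil, ha, ha']
  · have ha' : ¬ p = a := fun h => ha h.symm
    have hb' : ¬ p = b := fun h => hb h.symm
    simp [PySem.Dict.getD_modify, pvGetD_insert_nil, ha, hb, ha', hb']

theorem pvBuildA_getD (segs : List ((Int × Int) × (Int × Int))) :
    ∀ (d : PySem.Dict (Int × Int) (List (Int × Int))) (p : Int × Int),
      (segs.foldl pvStepA d).getD p [] = d.getD p [] ++ pvNbrs segs p := by
  induction segs with
  | nil => intro d p; simp [pvNbrs]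
  | cons s l ih =>
    intro d p
    rw [List.foldl_cons, ih, pvStepA_getD, pvNbrs_cons, List.append_assoc]

theorem pvGraphA_getD (segs : List ((Int × Int) × (Int × Int))) (p : Int × Int) :
    (pvBuildGraphA segs).getD p [] = pvNbrs segs p := by
  rw [pvBuildGraphA, pvBuildA_getD, PySem.Dict.getD_empty, List.nil_append]

theorem pvKeys_insert {nu : Type} (d : PySem.Dict (Int × Int) nu) (k : Int × Int) (v : nu) :
    (d.insert k v).keys = PySem.Set.add d.keys k := by
  by_cases h : d.contains k = true
  · rw [PySem.Dict.keys_insert_of_contains d v h,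
      pvAdd_of_mem _ _ ((PySem.Dict.contains_iff_mem_keys d k).mp h)]
  · have h' : d.contains k = false := by cases hb : d.contains k; rfl; exact absurd hb h
    rw [PySem.Dict.keys_insert_of_not_contains d v h',
      pvAdd_of_not_mem _ _ (fun hm => by rw [(PySem.Dict.contains_iff_mem_keys d k).mpr hm] at h'; cases h')]

theorem pvKeys_modify (d : PySem.Dict (Int × Int) (List (Int × Int))) (k : Int × Int)
    (f : List (Int × Int) → List (Int × Int)) :
    (d.modify k [] f).keys = PySem.Set.add d.keys k := by
  rw [PySem.Dict.keys_modify, pvKeys_insert]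

theorem pvKeys_insertIfAbsent (d : PySem.Dict (Int × Int) (List (Int × Int))) (k : Int × Int) :
    (if d.contains k then d else d.insert k []).keys = PySem.Set.add d.keys k := by
  by_cases h : d.contains k = true
  · rw [if_pos h, pvAdd_of_mem _ _ ((PySem.Dict.contains_iff_mem_keys d k).mp h)]
  · rw [if_neg h, pvKeys_insert]

theorem pvStepA_keys (d : PySem.Dict (Int × Int) (List (Int × Int)))
    (s : (Int × Int) × (Int × Int)) :
    (pvStepA d s).keys = PySem.Set.add (PySem.Set.add d.keys s.1) s.2 := by
  unfold pvStepA
  rw [pvKeys_modify, pvKeys_modify, pvKeys_insertIfAbsent, pvKeys_insertIfAbsent]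
  rw [pvAdd_of_mem _ s.1 (pvSubset_add _ _ (pvMem_add_self _ _))]
  rw [pvAdd_of_mem _ s.2 (pvMem_add_self _ _)]

theorem pvStepB_keys (d : PySem.Dict (Int × Int) Int) (s : (Int × Int) × (Int × Int)) :
    (pvStepB d s).keys = PySem.Set.add (PySem.Set.add d.keys s.1) s.2 := by
  unfold pvStepB
  rw [pvKeys_insert, pvKeys_insert]

theorem pvFoldKeys_A (segs : List ((Int × Int) × (Int × Int))) :
    ∀ d : PySem.Dict (Int × Int) (List (Int × Int)),
      (segs.foldl pvStepA d).keys = List.foldl PySem.Set.add d.keys (pvEndpoints segs) := by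
  induction segs with
  | nil => intro d; simp [pvEndpoints]
  | cons s l ih =>
    intro d
    rw [List.foldl_cons, ih, pvStepA_keys, pvEndpoints_cons, List.foldl_cons, List.foldl_cons]

theorem pvFoldKeys_B (segs : List ((Int × Int) × (Int × Int))) :
    ∀ d : PySem.Dict (Int × Int) Int,
      (segs.foldl pvStepB d).keys = List.foldl PySem.Set.add d.keys (pvEndpoints segs) := by
  induction segs with
  | nil => intro d; simp [pvEndpoints]
  | cons s l ih =>
    intro d
    rw [List.foldl_cons, ih, pvStepB_keys, pvEndpoints_cons, List.foldl_cons, List.foldl_cons]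

theorem pvKeys_graphA (segs : List ((Int × Int) × (Int × Int))) :
    (pvBuildGraphA segs).keys = pvK segs := by
  rw [pvBuildGraphA, pvFoldKeys_A, PySem.Dict.keys_empty, pvK, PySem.Set.ofList_eq_foldl]

theorem pvKeys_degB (segs : List ((Int × Int) × (Int × Int))) :
    (pvBuildDegB segs).keys = pvK segs := by
  rw [pvBuildDegB, pvFoldKeys_B, PySem.Dict.keys_empty, pvK, PySem.Set.ofList_eq_foldl]

theorem pvDegB_eq_endpointFold (segs : List ((Int × Int) × (Int × Int))) :
    ∀ d : PySem.Dict (Int × Int) Int,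
      segs.foldl pvStepB d
        = (pvEndpoints segs).foldl (fun d x => d.insert x (d.getD x 0 + 1)) d := by
  induction segs with
  | nil => intro d; simp [pvEndpoints]
  | cons s l ih =>
    intro d
    rw [List.foldl_cons, ih, pvEndpoints_cons, List.foldl_cons, List.foldl_cons]
    rfl

theorem pvDegB_getD (segs : List ((Int × Int) × (Int × Int))) (p : Int × Int) :
    (pvBuildDegB segs).getD p 0 = ((pvEndpoints segs).count p : Int) := by
  rw [pvBuildDegB, pvDegB_eq_endpointFold, PySem.Dict.getD_foldl_insert_add_one,
    PySem.Dict.getD_empty, zero_add]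

theorem pvNbrs_length (segs : List ((Int × Int) × (Int × Int))) (p : Int × Int) :
    (pvNbrs segs p).length = (pvEndpoints segs).count p := by
  induction segs with
  | nil => simp [pvNbrs, pvEndpoints]
  | cons s l ih =>
    rw [pvNbrs_cons, pvEndpoints_cons]
    simp only [List.length_append, ih, List.count_cons]
    by_cases h1 : s.1 = p <;> by_cases h2 : s.2 = p
    · simp [h1, h2]
      try omega
    · have h2' : ¬ p = s.2 := fun h => h2 h.symm
      simp [h1, h2, h2']
      try omega
    · have h1' : ¬ p = s.1 := fun h => h1 h.symm
      simp [h1, h2, h1']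
      try omega
    · have h1' : ¬ p = s.1 := fun h => h1 h.symm
      have h2' : ¬ p = s.2 := fun h => h2 h.symm
      simp [h1, h2, h1', h2']
      try omega

theorem pvMem_nbrs (segs : List ((Int × Int) × (Int × Int))) (p x : Int × Int) :
    x ∈ pvNbrs segs p ↔ pvAdj segs p x := by
  constructor
  · intro h
    rcases List.mem_flatMap.mp h with ⟨s, hs, hx⟩
    rcases List.mem_append.mp hx with h' | h'
    · by_cases c : s.1 = p
      · rw [if_pos c] at h'
        simp at h'
        exact ⟨s, hs, Or.inl ⟨c, h'.symm ▸ rfl⟩⟩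
      · rw [if_neg c] at h'; simp at h'
    · by_cases c : s.2 = p
      · rw [if_pos c] at h'
        simp at h'
        exact ⟨s, hs, Or.inr ⟨h'.symm ▸ rfl, c⟩⟩
      · rw [if_neg c] at h'; simp at h'
  · rintro ⟨s, hs, h | h⟩
    · exact List.mem_flatMap.mpr ⟨s, hs, List.mem_append.mpr (Or.inl (by simp [h.1, h.2]))⟩
    · exact List.mem_flatMap.mpr ⟨s, hs, List.mem_append.mpr (Or.inr (by simp [h.1, h.2]))⟩

theorem pvNbrs_sub_endpoints (segs : List ((Int × Int) × (Int × Int))) (p x : Int × Int)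
    (h : x ∈ pvNbrs segs p) : x ∈ pvEndpoints segs := by
  rcases List.mem_flatMap.mp h with ⟨s, hs, hx⟩
  rcases List.mem_append.mp hx with h' | h'
  · by_cases c : s.1 = p
    · rw [if_pos c] at h'; simp at h'
      exact List.mem_flatMap.mpr ⟨s, hs, by simp [h']⟩
    · rw [if_neg c] at h'; simp at h'
  · by_cases c : s.2 = p
    · rw [if_pos c] at h'; simp at h'
      exact List.mem_flatMap.mpr ⟨s, hs, by simp [h']⟩
    · rw [if_neg c] at h'; simp at h'

theorem pvNbrs_sub_K (segs : List ((Int × Int) × (Int × Int))) (p x : Int × Int)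
    (h : x ∈ pvNbrs segs p) : x ∈ pvK segs :=
  (PySem.Set.mem_ofList _ _).mpr (pvNbrs_sub_endpoints segs p x h)

theorem pvSeg_fst_mem_K (segs : List ((Int × Int) × (Int × Int)))
    {s : (Int × Int) × (Int × Int)} (hs : s ∈ segs) : s.1 ∈ pvK segs :=
  (PySem.Set.mem_ofList _ _).mpr (List.mem_flatMap.mpr ⟨s, hs, by simp⟩)

theorem pvSeg_snd_mem_K (segs : List ((Int × Int) × (Int × Int)))
    {s : (Int × Int) × (Int × Int)} (hs : s ∈ segs) : s.2 ∈ pvK segs :=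
  (PySem.Set.mem_ofList _ _).mpr (List.mem_flatMap.mpr ⟨s, hs, by simp⟩)

-- ---- DFS (A's connectivity search) ----

theorem pvFoldl_sub {f : PySem.Set (Int × Int) → (Int × Int) → PySem.Set (Int × Int)}
    (hf : ∀ acc x, acc ⊆ f acc x) :
    ∀ (l : List (Int × Int)) (acc : PySem.Set (Int × Int)), acc ⊆ l.foldl f acc := by
  intro l
  induction l with
  | nil => intro acc; exact fun _ h => h
  | cons x l ih => intro acc; exact List.Subset.trans (hf acc x) (ih (f acc x))

theorem pvDfsA_mono (segs : List ((Int × Int) × (Int × Int))) :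
    ∀ (fuel : Nat) (v : PySem.Set (Int × Int)) (p : Int × Int),
      v ⊆ pvDfsA (pvBuildGraphA segs) fuel v p := by
  intro fuel
  induction fuel with
  | zero => intro v p; exact fun _ h => h
  | succ fuel ih =>
    intro v p
    show v ⊆ List.foldl _ (PySem.Set.add v p) _
    refine List.Subset.trans (pvSubset_add v p) (pvFoldl_sub ?_ _ _)
    intro acc n
    by_cases h : PySem.Set.contains acc n = true
    · rw [if_pos h]; exact fun _ h => h
    · rw [if_neg h]; exact ih acc n

theorem pvFoldl_pred_mem {α : Type} (P : PySem.Set (Int × Int) → Prop)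
    (f : PySem.Set (Int × Int) → α → PySem.Set (Int × Int)) :
    ∀ l : List α, (∀ acc x, x ∈ l → P acc → P (f acc x)) →
      ∀ acc, P acc → P (l.foldl f acc) := by
  intro l
  induction l with
  | nil => intro _ acc h; exact h
  | cons x l ih =>
    intro hstep acc hacc
    exact ih (fun a y hy => hstep a y (List.mem_cons_of_mem x hy))
      (f acc x) (hstep acc x List.mem_cons_self hacc)

theorem pvDfsA_nodup (segs : List ((Int × Int) × (Int × Int))) :
    ∀ (fuel : Nat) (v : PySem.Set (Int × Int)) (p : Int × Int),
      v.Nodup → (pvDfsA (pvBuildGraphA segs) fuel v p).Nodup := by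
  intro fuel
  induction fuel with
  | zero => intro v p h; exact h
  | succ fuel ih =>
    intro v p hv
    refine pvFoldl_pred_mem List.Nodup _ _ ?_ _ (PySem.Set.nodup_add v p hv)
    intro acc n _ hacc
    by_cases h : PySem.Set.contains acc n = true
    · rw [if_pos h]; exact hacc
    · rw [if_neg h]; exact ih acc n hacc

theorem pvDfsA_subK (segs : List ((Int × Int) × (Int × Int))) :
    ∀ (fuel : Nat) (v : PySem.Set (Int × Int)) (p : Int × Int),
      v ⊆ pvK segs → p ∈ pvK segs → pvDfsA (pvBuildGraphA segs) fuel v p ⊆ pvK segs := by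
  intro fuel
  induction fuel with
  | zero => intro v p hv _; exact hv
  | succ fuel ih =>
    intro v p hv hp
    show List.foldl _ (PySem.Set.add v p) ((pvBuildGraphA segs).getD p []) ⊆ pvK segs
    rw [pvGraphA_getD]
    refine pvFoldl_pred_mem (fun acc => acc ⊆ pvK segs) _ _ ?_ _ (pvAdd_subset hp hv)
    intro acc n hn hacc
    by_cases h : PySem.Set.contains acc n = true
    · rw [if_pos h]; exact hacc
    · rw [if_neg h]; exact ih acc n hacc (pvNbrs_sub_K segs p n hn)

theorem pvDfsA_sound (segs : List ((Int × Int) × (Int × Int))) :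
    ∀ (fuel : Nat) (v : PySem.Set (Int × Int)) (p : Int × Int),
      ∀ x ∈ pvDfsA (pvBuildGraphA segs) fuel v p,
        x ∈ v ∨ Relation.ReflTransGen (pvAdj segs) p x := by
  intro fuel
  induction fuel with
  | zero => intro v p x hx; exact Or.inl hx
  | succ fuel ih =>
    intro v p
    show ∀ x ∈ List.foldl _ (PySem.Set.add v p) ((pvBuildGraphA segs).getD p []), _
    rw [pvGraphA_getD]
    refine pvFoldl_pred_mem
      (fun acc => ∀ x ∈ acc, x ∈ v ∨ Relation.ReflTransGen (pvAdj segs) p x) _ _ ?_ _ ?_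
    · intro acc n hn hacc
      by_cases h : PySem.Set.contains acc n = true
      · rw [if_pos h]; exact hacc
      · rw [if_neg h]
        intro x hx
        rcases ih acc n x hx with h' | h'
        · exact hacc x h'
        · exact Or.inr (Relation.ReflTransGen.head ((pvMem_nbrs segs p n).mp hn) h')
    · intro x hx
      rcases (PySem.Set.mem_add v p x).mp hx with h | h
      · exact Or.inl h
      · exact Or.inr (h ▸ Relation.ReflTransGen.refl)

theorem pvDfsA_complete (segs : List ((Int × Int) × (Int × Int))) :
    ∀ (fuel : Nat) (v : PySem.Set (Int × Int)) (p : Int × Int),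
      pvUnvis segs v < fuel → p ∈ pvK segs → p ∉ v → v ⊆ pvK segs →
      (PySem.Set.add v p ⊆ pvDfsA (pvBuildGraphA segs) fuel v p ∧
        (∀ x ∈ pvDfsA (pvBuildGraphA segs) fuel v p, x ∉ v →
          ∀ y ∈ pvNbrs segs x, y ∈ pvDfsA (pvBuildGraphA segs) fuel v p)) := by
  intro fuel
  induction fuel with
  | zero => intro v p h; omega
  | succ fuel ih =>
    intro v p hfuel hpK hpv hvK
    have hdfs : pvDfsA (pvBuildGraphA segs) (fuel + 1) v p
        = List.foldl
            (fun w n => if PySem.Set.contains w n then w else pvDfsA (pvBuildGraphA segs) fuel w n)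
            (PySem.Set.add v p) (pvNbrs segs p) := by
      show List.foldl _ (PySem.Set.add v p) ((pvBuildGraphA segs).getD p []) = _
      rw [pvGraphA_getD]
    have inner : ∀ l : List (Int × Int), (∀ n ∈ l, n ∈ pvK segs) →
        ∀ acc : PySem.Set (Int × Int),
          PySem.Set.add v p ⊆ acc → acc ⊆ pvK segs → pvUnvis segs acc < fuel →
          (∀ x ∈ acc, x ∉ PySem.Set.add v p → ∀ y ∈ pvNbrs segs x, y ∈ acc) →
          (acc ⊆ List.foldl (fun w n => if PySem.Set.contains w n then w else pvDfsA (pvBuildGraphA segs) fuel w n) acc l ∧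
           (∀ n ∈ l, n ∈ List.foldl (fun w n => if PySem.Set.contains w n then w else pvDfsA (pvBuildGraphA segs) fuel w n) acc l) ∧
           List.foldl (fun w n => if PySem.Set.contains w n then w else pvDfsA (pvBuildGraphA segs) fuel w n) acc l ⊆ pvK segs ∧
           pvUnvis segs (List.foldl (fun w n => if PySem.Set.contains w n then w else pvDfsA (pvBuildGraphA segs) fuel w n) acc l) < fuel ∧
           (∀ x ∈ List.foldl (fun w n => if PySem.Set.contains w n then w else pvDfsA (pvBuildGraphA segs) fuel w n) acc l,
              x ∉ PySem.Set.add v p →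
              ∀ y ∈ pvNbrs segs x,
                y ∈ List.foldl (fun w n => if PySem.Set.contains w n then w else pvDfsA (pvBuildGraphA segs) fuel w n) acc l)) := by
      intro l
      induction l with
      | nil =>
        intro _ acc h0 hK hf hcl
        exact ⟨fun _ h => h, fun n hn => absurd hn List.not_mem_nil, hK, hf, hcl⟩
      | cons n l ihl =>
        intro hlK acc h0 hK hf hcl
        rw [List.foldl_cons]
        by_cases hc : PySem.Set.contains acc n = true
        · rw [if_pos hc]
          obtain ⟨q1, q2, q3, q4, q5⟩ := ihl (fun m hm => hlK m (List.mem_cons_of_mem n hm)) acc h0 hK hf hcl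
          refine ⟨q1, fun m hm => ?_, q3, q4, q5⟩
          rcases List.mem_cons.mp hm with rfl | hm'
          · exact q1 ((PySem.Set.contains_iff acc m).mp hc)
          · exact q2 m hm'
        · rw [if_neg hc]
          have hn : n ∉ acc := pvNot_mem_of_not_contains hc
          obtain ⟨r1, r2⟩ := ih acc n hf (hlK n List.mem_cons_self) hn hK
          have hmono : acc ⊆ pvDfsA (pvBuildGraphA segs) fuel acc n := pvDfsA_mono segs fuel acc n
          have hsubK : pvDfsA (pvBuildGraphA segs) fuel acc n ⊆ pvK segs :=
            pvDfsA_subK segs fuel acc n hK (hlK n List.mem_cons_self)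
          have hf' : pvUnvis segs (pvDfsA (pvBuildGraphA segs) fuel acc n) < fuel :=
            lt_of_le_of_lt (pvUnvis_mono segs hmono) hf
          have hcl' : ∀ x ∈ pvDfsA (pvBuildGraphA segs) fuel acc n, x ∉ PySem.Set.add v p →
              ∀ y ∈ pvNbrs segs x, y ∈ pvDfsA (pvBuildGraphA segs) fuel acc n := by
            intro x hx hx0 y hy
            by_cases hxa : x ∈ acc
            · exact hmono (hcl x hxa hx0 y hy)
            · exact r2 x hx hxa y hy
          obtain ⟨q1, q2, q3, q4, q5⟩ := ihl (fun m hm => hlK m (List.mem_cons_of_mem n hm))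
            (pvDfsA (pvBuildGraphA segs) fuel acc n)
            (List.Subset.trans h0 hmono) hsubK hf' hcl'
          refine ⟨List.Subset.trans hmono q1, fun m hm => ?_, q3, q4, q5⟩
          rcases List.mem_cons.mp hm with rfl | hm'
          · exact q1 (r1 (pvMem_add_self acc m))
          · exact q2 m hm'
    have haccK : PySem.Set.add v p ⊆ pvK segs := pvAdd_subset hpK hvK
    have hacc_f : pvUnvis segs (PySem.Set.add v p) < fuel :=
      lt_of_lt_of_le (pvUnvis_add_lt segs hpK hpv) (Nat.lt_succ_iff.mp hfuel)
    obtain ⟨q1, q2, q3, q4, q5⟩ := inner (pvNbrs segs p) (fun n hn => pvNbrs_sub_K segs p n hn)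
      (PySem.Set.add v p) (fun _ h => h) haccK hacc_f
      (fun x hx hx' => absurd hx hx')
    rw [hdfs]
    refine ⟨q1, ?_⟩
    intro x hx hxv y hy
    by_cases hxp : x = p
    · subst hxp
      exact q2 y hy
    · refine q5 x hx ?_ y hy
      intro hmem
      rcases (PySem.Set.mem_add v p x).mp hmem with h | h
      · exact hxv h
      · exact hxp h

-- ---- saturation (B's connectivity search) ----

theorem pvPass_true :
    ∀ (l : List ((Int × Int) × (Int × Int))) (st : PySem.Set (Int × Int) × Bool),
      st.2 = true → (l.foldl pvStepP st).2 = true := by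
  intro l
  induction l with
  | nil => intro st h; exact h
  | cons s l ih =>
    intro st h
    rw [List.foldl_cons]
    apply ih
    unfold pvStepP
    split_ifs <;> simp [h]

theorem pvPass_facts (segs : List ((Int × Int) × (Int × Int))) (start : Int × Int) :
    ∀ (l : List ((Int × Int) × (Int × Int))), (∀ s ∈ l, s ∈ segs) →
      ∀ st : PySem.Set (Int × Int) × Bool,
      (st.1 ⊆ (l.foldl pvStepP st).1) ∧
      (st.1.Nodup → (l.foldl pvStepP st).1.Nodup) ∧
      (st.1 ⊆ pvK segs → (l.foldl pvStepP st).1 ⊆ pvK segs) ∧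
      ((∀ x ∈ st.1, Relation.ReflTransGen (pvAdj segs) start x) →
        ∀ x ∈ (l.foldl pvStepP st).1, Relation.ReflTransGen (pvAdj segs) start x) ∧
      ((l.foldl pvStepP st).2 = true → st.2 = true ∨
        pvUnvis segs (l.foldl pvStepP st).1 < pvUnvis segs st.1) ∧
      ((l.foldl pvStepP st).2 = false →
        (l.foldl pvStepP st).1 = st.1 ∧ st.2 = false ∧
        ∀ s ∈ l, (s.1 ∈ st.1 ↔ s.2 ∈ st.1)) := by
  intro l
  induction l with
  | nil =>
    intro _ st
    exact ⟨fun _ h => h, fun h => h, fun h => h, fun h => h, fun h => Or.inl h,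
      fun h => ⟨rfl, h, fun s hs => absurd hs List.not_mem_nil⟩⟩
  | cons s l ih =>
    intro hl st
    have hs : s ∈ segs := hl s List.mem_cons_self
    have hl' : ∀ s' ∈ l, s' ∈ segs := fun s' h => hl s' (List.mem_cons_of_mem s h)
    rw [List.foldl_cons]
    by_cases c1 : (PySem.Set.contains st.1 s.1 && !PySem.Set.contains st.1 s.2) = true
    · have hst : pvStepP st s = (PySem.Set.add st.1 s.2, true) := by
        unfold pvStepP; rw [if_pos c1]
      rw [Bool.and_eq_true] at c1
      have hmem1 : s.1 ∈ st.1 := (PySem.Set.contains_iff _ _).mp c1.1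
      have hmem2 : s.2 ∉ st.1 := by
        have hb := c1.2
        rw [Bool.not_eq_true'] at hb
        exact fun hm => by rw [pvContains_of_mem hm] at hb; cases hb
      obtain ⟨q1, q2, q3, q4, q5, q6⟩ := ih hl' (PySem.Set.add st.1 s.2, true)
      rw [hst]
      refine ⟨List.Subset.trans (pvSubset_add _ _) q1,
        fun h => q2 (PySem.Set.nodup_add _ _ h),
        fun h => q3 (pvAdd_subset (pvSeg_snd_mem_K segs hs) h),
        ?_, ?_, ?_⟩
      · intro h x hx
        refine q4 ?_ x hx
        intro y hy
        rcases (PySem.Set.mem_add _ _ _).mp hy with h' | h'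
        · exact h y h'
        · subst h'
          exact Relation.ReflTransGen.tail (h s.1 hmem1) ⟨s, hs, Or.inl ⟨rfl, rfl⟩⟩
      · intro _
        refine Or.inr ?_
        calc pvUnvis segs (l.foldl pvStepP (PySem.Set.add st.1 s.2, true)).1
            ≤ pvUnvis segs (PySem.Set.add st.1 s.2) := pvUnvis_mono segs q1
          _ < pvUnvis segs st.1 := pvUnvis_add_lt segs (pvSeg_snd_mem_K segs hs) hmem2
      · intro hfalse
        rw [pvPass_true l _ rfl] at hfalse
        cases hfalse
    · by_cases c2 : (PySem.Set.contains st.1 s.2 && !PySem.Set.contains st.1 s.1) = true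
      · have hst : pvStepP st s = (PySem.Set.add st.1 s.1, true) := by
          unfold pvStepP; rw [if_neg c1, if_pos c2]
        rw [Bool.and_eq_true] at c2
        have hmem1 : s.2 ∈ st.1 := (PySem.Set.contains_iff _ _).mp c2.1
        have hmem2 : s.1 ∉ st.1 := by
          have hb := c2.2
          rw [Bool.not_eq_true'] at hb
          exact fun hm => by rw [pvContains_of_mem hm] at hb; cases hb
        obtain ⟨q1, q2, q3, q4, q5, q6⟩ := ih hl' (PySem.Set.add st.1 s.1, true)
        rw [hst]
        refine ⟨List.Subset.trans (pvSubset_add _ _) q1,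
          fun h => q2 (PySem.Set.nodup_add _ _ h),
          fun h => q3 (pvAdd_subset (pvSeg_fst_mem_K segs hs) h),
          ?_, ?_, ?_⟩
        · intro h x hx
          refine q4 ?_ x hx
          intro y hy
          rcases (PySem.Set.mem_add _ _ _).mp hy with h' | h'
          · exact h y h'
          · subst h'
            exact Relation.ReflTransGen.tail (h s.2 hmem1) ⟨s, hs, Or.inr ⟨rfl, rfl⟩⟩
        · intro _
          refine Or.inr ?_
          calc pvUnvis segs (l.foldl pvStepP (PySem.Set.add st.1 s.1, true)).1
              ≤ pvUnvis segs (PySem.Set.add st.1 s.1) := pvUnvis_mono segs q1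
            _ < pvUnvis segs st.1 := pvUnvis_add_lt segs (pvSeg_fst_mem_K segs hs) hmem2
        · intro hfalse
          rw [pvPass_true l _ rfl] at hfalse
          cases hfalse
      · have hst : pvStepP st s = st := by
          unfold pvStepP; rw [if_neg c1, if_neg c2]
        obtain ⟨q1, q2, q3, q4, q5, q6⟩ := ih hl' st
        rw [hst]
        refine ⟨q1, q2, q3, q4, q5, ?_⟩
        intro hfalse
        obtain ⟨r1, r2, r3⟩ := q6 hfalse
        refine ⟨r1, r2, fun s' hs' => ?_⟩
        rcases List.mem_cons.mp hs' with rfl | hs''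
        · constructor
          · intro h1
            by_contra h2
            exact c1 (by rw [pvContains_of_mem h1, pvContains_of_not_mem h2]; rfl)
          · intro h2
            by_contra h1
            exact c2 (by rw [pvContains_of_mem h2, pvContains_of_not_mem h1]; rfl)
        · exact r3 s' hs''

theorem pvLoopB_spec (segs : List ((Int × Int) × (Int × Int))) (start : Int × Int) :
    ∀ (fuel : Nat) (c : PySem.Set (Int × Int)),
      pvUnvis segs c < fuel → c.Nodup → c ⊆ pvK segs →
      (∀ x ∈ c, Relation.ReflTransGen (pvAdj segs) start x) →
      (c ⊆ pvLoopB segs fuel c ∧ (pvLoopB segs fuel c).Nodup ∧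
        pvLoopB segs fuel c ⊆ pvK segs ∧
        (∀ x ∈ pvLoopB segs fuel c, Relation.ReflTransGen (pvAdj segs) start x) ∧
        (∀ a ∈ pvLoopB segs fuel c, ∀ b, pvAdj segs a b → b ∈ pvLoopB segs fuel c)) := by
  intro fuel
  induction fuel with
  | zero => intro c h; omega
  | succ fuel ih =>
    intro c hfuel hnd hK hsound
    obtain ⟨q1, q2, q3, q4, q5, q6⟩ := pvPass_facts segs start segs (fun _ h => h) (c, false)
    have hunf : pvLoopB segs (fuel + 1) c
        = if (pvPassB segs c).2 then pvLoopB segs fuel (pvPassB segs c).1 else (pvPassB segs c).1 := rfl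
    cases hr : (pvPassB segs c).2 with
    | false =>
      obtain ⟨r1, _, r3⟩ := q6 hr
      have heq : pvLoopB segs (fuel + 1) c = c := by
        rw [hunf, hr, if_neg (by simp)]
        exact r1
      rw [heq]
      refine ⟨fun _ h => h, hnd, hK, hsound, ?_⟩
      intro a ha b hab
      rcases hab with ⟨s, hsmem, h | h⟩
      · have h1 : s.1 ∈ c := by rw [h.1]; exact ha
        have h2 : s.2 ∈ c := (r3 s hsmem).mp h1
        rw [← h.2]; exact h2
      · have h1 : s.2 ∈ c := by rw [h.2]; exact ha
        have h2 : s.1 ∈ c := (r3 s hsmem).mpr h1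
        rw [← h.1]; exact h2
    | true =>
      have heq : pvLoopB segs (fuel + 1) c = pvLoopB segs fuel (pvPassB segs c).1 := by
        rw [hunf, hr, if_pos rfl]
      have hlt : pvUnvis segs (pvPassB segs c).1 < pvUnvis segs c := by
        rcases q5 hr with h | h
        · cases h
        · exact h
      have hf' : pvUnvis segs (pvPassB segs c).1 < fuel :=
        lt_of_lt_of_le hlt (Nat.lt_succ_iff.mp hfuel)
      obtain ⟨w1, w2, w3, w4, w5⟩ := ih (pvPassB segs c).1 hf' (q2 hnd) (q3 hK) (q4 hsound)
      rw [heq]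
      exact ⟨List.Subset.trans q1 w1, w2, w3, w4, w5⟩

-- a set containing start and closed under the edge relation contains everything reachable
theorem pvReach_mem (segs : List ((Int × Int) × (Int × Int))) (start : Int × Int)
    (F : PySem.Set (Int × Int)) (hstart : start ∈ F)
    (hclosed : ∀ a ∈ F, ∀ b, pvAdj segs a b → b ∈ F) :
    ∀ x, Relation.ReflTransGen (pvAdj segs) start x → x ∈ F := by
  intro x hx
  induction hx with
  | refl => exact hstart
  | tail _ hbc ih => exact hclosed _ ih _ hbc

-- ---- the two degree checks and sizes agree ----

theorem pvSize_eq_keysLen {kk nu : Type} (d : PySem.Dict kk nu) : d.size = d.keys.length := by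
  simp [PySem.Dict.size, PySem.Dict.keys]

theorem pvAny_eq (segs : List ((Int × Int) × (Int × Int))) :
    (pvBuildGraphA segs).items.any (fun kv => decide (kv.2.length ≠ 2))
      = (pvBuildDegB segs).values.any (fun d => decide (d ≠ 2)) := by
  have hndA : (pvBuildGraphA segs).keys.Nodup := by
    rw [pvKeys_graphA]; exact PySem.Set.nodup_ofList _
  have hndB : (pvBuildDegB segs).keys.Nodup := by
    rw [pvKeys_degB]; exact PySem.Set.nodup_ofList _
  rw [PySem.Dict.items_eq_map_keys _ hndA [], PySem.Dict.values_eq_map_keys _ hndB 0,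
    List.any_map, List.any_map, pvKeys_graphA, pvKeys_degB]
  apply PySem.List.any_congr_mem
  intro k _
  show decide (((pvBuildGraphA segs).getD k []).length ≠ 2)
      = decide ((pvBuildDegB segs).getD k 0 ≠ 2)
  rw [pvGraphA_getD, pvDegB_getD, pvNbrs_length]
  apply decide_eq_decide.mpr
  constructor
  · intro h h'; exact h (by exact_mod_cast h')
  · intro h h'; exact h (by exact_mod_cast h')

theorem pvFoldl_add_prefix :
    ∀ (xs : List (Int × Int)) (s : PySem.Set (Int × Int)),
      ∃ t, List.foldl PySem.Set.add s xs = s ++ t := by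
  intro xs
  induction xs with
  | nil => intro s; exact ⟨[], by simp⟩
  | cons x xs ih =>
    intro s
    by_cases h : x ∈ s
    · rw [List.foldl_cons, pvAdd_of_mem s x h]
      exact ih s
    · rw [List.foldl_cons, pvAdd_of_not_mem s x h]
      obtain ⟨t, ht⟩ := ih (s ++ [x])
      exact ⟨x :: t, by rw [ht]; simp⟩

theorem pvK_cons (s0 : (Int × Int) × (Int × Int)) (rest : List ((Int × Int) × (Int × Int))) :
    ∃ t, pvK (s0 :: rest) = s0.1 :: t := by
  rw [pvK, PySem.Set.ofList_eq_foldl, pvEndpoints_cons, List.foldl_cons]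
  have h0 : PySem.Set.add ([] : PySem.Set (Int × Int)) s0.1 = [s0.1] := by
    rw [pvAdd_of_not_mem _ _ List.not_mem_nil]; rfl
  rw [h0]
  obtain ⟨t, ht⟩ := pvFoldl_add_prefix (s0.2 :: pvEndpoints rest) [s0.1]
  exact ⟨t, by rw [ht]; rfl⟩

-- ===== VERDICT (by name: the statement is the Claim_ definition above) =====
theorem validate_single_continuous_loop_py_spec : Claim_equal_validate_single_continuous_loop_py := by
  intro segments _
  unfold Spec_validate_single_continuous_loop_py
  cases segments with
  | nil => rfl
  | cons s0 rest =>
    have hemp : (PySem.Set.empty : PySem.Set (Int × Int)) = [] := rfl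
    obtain ⟨t, hKcons⟩ := pvK_cons s0 rest
    have hkeysA : (pvBuildGraphA (s0 :: rest)).keys = s0.1 :: t := by
      rw [pvKeys_graphA, hKcons]
    have hsizeA : (pvBuildGraphA (s0 :: rest)).size = (pvK (s0 :: rest)).length := by
      rw [pvSize_eq_keysLen, pvKeys_graphA]
    have hsizeB : (pvBuildDegB (s0 :: rest)).size = (pvK (s0 :: rest)).length := by
      rw [pvSize_eq_keysLen, pvKeys_degB]
    have hstartK : s0.1 ∈ pvK (s0 :: rest) := pvSeg_fst_mem_K _ List.mem_cons_self
    by_cases hAny : ((pvBuildDegB (s0 :: rest)).values.any (fun d => decide (d ≠ 2))) = true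
    · have hAnyA : ((pvBuildGraphA (s0 :: rest)).items.any (fun kv => decide (kv.2.length ≠ 2))) = true := by
        rw [pvAny_eq]; exact hAny
      show validate_single_continuous_loop_py (s0 :: rest)
          = validate_single_continuous_loop_py_alt (s0 :: rest)
      unfold validate_single_continuous_loop_py validate_single_continuous_loop_py_alt
      simp only [List.isEmpty_cons, Bool.false_eq_true, if_false, hAnyA, hAny, if_true]
    · have hAny' : ((pvBuildDegB (s0 :: rest)).values.any (fun d => decide (d ≠ 2))) = false := by
        cases hb : ((pvBuildDegB (s0 :: rest)).values.any (fun d => decide (d ≠ 2)))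
        · rfl
        · exact absurd hb hAny
      have hAnyA : ((pvBuildGraphA (s0 :: rest)).items.any (fun kv => decide (kv.2.length ≠ 2))) = false := by
        rw [pvAny_eq]; exact hAny'
      have hsz0 : ¬ ((pvBuildGraphA (s0 :: rest)).size = 0) := by
        rw [hsizeA, hKcons]
        simp
      -- the two searches compute the same vertex set
      have hcompl := pvDfsA_complete (s0 :: rest) ((pvBuildGraphA (s0 :: rest)).size + 1)
        [] s0.1 (by rw [pvUnvis_empty, hsizeA]; omega) hstartK List.not_mem_nil
        (List.nil_subset _)
      have hVA : ∀ x, x ∈ pvDfsA (pvBuildGraphA (s0 :: rest))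
          ((pvBuildGraphA (s0 :: rest)).size + 1) [] s0.1
          ↔ Relation.ReflTransGen (pvAdj (s0 :: rest)) s0.1 x := by
        intro x
        constructor
        · intro hx
          rcases pvDfsA_sound (s0 :: rest) _ [] s0.1 x hx with h | h
          · exact absurd h List.not_mem_nil
          · exact h
        · refine pvReach_mem _ _ _ (hcompl.1 (pvMem_add_self [] s0.1)) ?_ x
          intro a ha b hab
          exact hcompl.2 a ha List.not_mem_nil b ((pvMem_nbrs _ a b).mpr hab)
      have hc0 : PySem.Set.add PySem.Set.empty s0.1 = [s0.1] := by
        rw [hemp, pvAdd_of_not_mem _ _ List.not_mem_nil]; rfl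
      have hloop := pvLoopB_spec (s0 :: rest) s0.1 ((pvBuildDegB (s0 :: rest)).size + 1) [s0.1]
        (lt_of_le_of_lt (pvUnvis_le_len _ _) (by rw [hsizeB]; omega))
        (List.nodup_singleton _)
        (fun x hx => by rcases List.mem_singleton.mp hx with rfl; exact hstartK)
        (fun x hx => by rcases List.mem_singleton.mp hx with rfl; exact Relation.ReflTransGen.refl)
      have hF : ∀ x, x ∈ pvLoopB (s0 :: rest) ((pvBuildDegB (s0 :: rest)).size + 1) [s0.1]
          ↔ Relation.ReflTransGen (pvAdj (s0 :: rest)) s0.1 x := by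
        intro x
        constructor
        · exact hloop.2.2.2.1 x
        · exact pvReach_mem _ _ _ (hloop.1 (List.mem_singleton.mpr rfl)) hloop.2.2.2.2 x
      have hndVA : (pvDfsA (pvBuildGraphA (s0 :: rest))
          ((pvBuildGraphA (s0 :: rest)).size + 1) [] s0.1).Nodup :=
        pvDfsA_nodup (s0 :: rest) _ [] s0.1 List.nodup_nil
      have hlen : (pvDfsA (pvBuildGraphA (s0 :: rest))
            ((pvBuildGraphA (s0 :: rest)).size + 1) [] s0.1).length
          = (pvLoopB (s0 :: rest) ((pvBuildDegB (s0 :: rest)).size + 1) [s0.1]).length :=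
        ((List.perm_ext_iff_of_nodup hndVA hloop.2.1).mpr
          (fun a => (hVA a).trans (hF a).symm)).length_eq
      show validate_single_continuous_loop_py (s0 :: rest)
          = validate_single_continuous_loop_py_alt (s0 :: rest)
      unfold validate_single_continuous_loop_py validate_single_continuous_loop_py_alt
      simp only [List.isEmpty_cons, Bool.false_eq_true, if_false, hAnyA, hAny', if_true,
        if_neg hsz0, hkeysA]
      rw [hemp, hc0] at *
      rw [hlen, hsizeA, hsizeB]
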